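-- pv_equiv track=rewrite | github.com/jorgesebas/advent-of-code | d15/src/main2.py | listar_box_a_mover
-- ===== SOURCE A (Python) =====
-- def listar_box_a_mover(grid, box, move, new_robot_pos):
--     """
--     Lista todas las cajas conectadas en línea en la dirección del movimiento.
--
--     Args:
--         grid: Mapa del almacén.
--         box: Tupla con las posiciones izquierda y derecha de la caja ((y1, x1), (y2, x2)).
--         move: Dirección de movimiento ('^', 'v', '<', '>').
--         new_robot_pos: Nueva posición del robot después del movimiento.
--
--     Returns:
--         lista_cajas: Lista de todas las cajas en la dirección del movimiento.
--         movible: Booleano indicando si todas las cajas pueden moverse.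
--     """
--     directions = {
--         '^': (-1, 0),
--         'v': (1, 0),
--         '<': (0, -1),
--         '>': (0, 1),
--     }
--
--     dy, dx = directions[move]
--     lista_cajas = [box]
--     movible = True
--
--     # Posiciones iniciales de la caja detectada
--     left_pos, right_pos = box
--
--     # Variables de posición para iterar en la dirección
--     next_left = (left_pos[0] + dy, left_pos[1] + dx)
--     next_right = (right_pos[0] + dy, right_pos[1] + dx)
--
--     # Itera buscando más cajas en la dirección del movimiento
--     while True:
--         if (
--             0 <= next_left[0] < len(grid) and
--             0 <= next_left[1] < len(grid[0]) and
--             0 <= next_right[0] < len(grid) and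
--             0 <= next_right[1] < len(grid[0])
--         ):
--             if (
--                 grid[next_left[0]][next_left[1]] == '.' and
--                 grid[next_right[0]][next_right[1]] == '.'
--             ):
--                 # Espacios vacíos encontrados: no hay más cajas
--                 break
--             elif (
--                 (next_left, next_right) not in lista_cajas
--             ):  # Verifica si hay otra caja alineada
--                 lista_cajas.append((next_left, next_right))
--                 next_left = (next_left[0] + dy, next_left[1] + dx)
--                 next_right = (next_right[0] + dy, next_right[1] + dx)
--             else:
--                 break
--         else:
--             movible = False
--             break
--
--     # Verifica si todas las cajas alineadas pueden moverse
--     for left, right in lista_cajas: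
--         new_left = (left[0] + dy, left[1] + dx)
--         new_right = (right[0] + dy, right[1] + dx)
--         if not (
--             0 <= new_left[0] < len(grid) and
--             0 <= new_left[1] < len(grid[0]) and
--             0 <= new_right[0] < len(grid) and
--             0 <= new_right[1] < len(grid[0]) and
--             grid[new_left[0]][new_left[1]] == '.' and
--             grid[new_right[0]][new_right[1]] == '.'
--         ):
--             movible = False
--             break
--
--     return lista_cajas, movible
-- ===== SOURCE B (Python) =====
-- def listar_box_a_mover(grid, box, move, new_robot_pos):
--     """Single forward walk: fuses A's box-tracing loop and its second
--     per-box movability pass into one loop carrying `movible`."""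
--     dy, dx = {
--         '^': (-1, 0),
--         'v': (1, 0),
--         '<': (0, -1),
--         '>': (0, 1),
--     }[move]
--     rows = len(grid)
--     cols = len(grid[0]) if grid else 0
--     lista_cajas = [box]
--     movible = True
--     cur = box
--     while True:
--         (ly, lx), (ry, rx) = cur
--         nl = (ly + dy, lx + dx)
--         nr = (ry + dy, rx + dx)
--         if not (0 <= nl[0] < rows and 0 <= nl[1] < cols
--                 and 0 <= nr[0] < rows and 0 <= nr[1] < cols):
--             movible = False
--             break
--         if grid[nl[0]][nl[1]] == '.' and grid[nr[0]][nr[1]] == '.':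
--             break
--         # something ahead: the current box cannot move into empty space,
--         # and the cells ahead form the next box in the chain
--         movible = False
--         lista_cajas.append((nl, nr))
--         cur = (nl, nr)
--     return lista_cajas, movible
-- ===== Notes on version B (the rewrite author's own statement) =====
-- stated objective: simpler
-- what changed: B fuses A's two phases (the box-tracing while-loop with a membership test plus a second per-box movability pass over the whole list) into one forward walk that carries the movible flag, exploiting that a traced successor box proves its predecessor immovable.
import Mathlib
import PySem

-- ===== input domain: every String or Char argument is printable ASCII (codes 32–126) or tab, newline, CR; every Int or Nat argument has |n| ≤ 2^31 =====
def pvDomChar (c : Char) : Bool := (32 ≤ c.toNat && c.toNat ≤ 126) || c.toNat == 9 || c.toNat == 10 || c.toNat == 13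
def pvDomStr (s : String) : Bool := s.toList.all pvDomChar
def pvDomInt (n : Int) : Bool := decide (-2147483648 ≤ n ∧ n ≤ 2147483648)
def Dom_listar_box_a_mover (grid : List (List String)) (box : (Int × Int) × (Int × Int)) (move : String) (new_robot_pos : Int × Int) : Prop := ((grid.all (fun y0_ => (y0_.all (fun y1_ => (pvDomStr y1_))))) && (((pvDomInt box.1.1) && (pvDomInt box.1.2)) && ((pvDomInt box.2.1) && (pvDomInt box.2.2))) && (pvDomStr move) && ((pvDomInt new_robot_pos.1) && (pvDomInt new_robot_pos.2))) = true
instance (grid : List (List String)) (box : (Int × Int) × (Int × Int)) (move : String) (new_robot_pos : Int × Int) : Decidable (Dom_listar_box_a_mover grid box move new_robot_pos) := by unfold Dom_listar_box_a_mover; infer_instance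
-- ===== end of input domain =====

-- B fuses A's box-tracing loop and its second per-box movability pass into ONE
-- forward walk carrying `movible` (objective: simpler — one pass, no membership test).

-- Helpers shared by both ports (both Pythons contain these very expressions):
-- width = len(grid[0]) (0 for the empty grid, which Python never evaluates).
def pvWidth (grid : List (List String)) : Nat := (grid.headD []).length

-- '0 <= p[0] < len(grid) and 0 <= p[1] < len(grid[0])'
def pvInB (grid : List (List String)) (p : Int × Int) : Bool :=
  decide (0 ≤ p.1) && decide (p.1 < (grid.length : Int)) &&
  decide (0 ≤ p.2) && decide (p.2 < (pvWidth grid : Int))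

-- "grid[p[0]][p[1]] == '.'" — pyGet? is none exactly where Python raises IndexError;
-- under Pre_ every guarded access is some, so this equals the Python comparison.
def pvDot (grid : List (List String)) (p : Int × Int) : Bool :=
  ((PySem.List.pyGet? grid p.1).bind (fun row => PySem.List.pyGet? row p.2)) == some "."

-- directions[move]; an unlisted move is a Python KeyError, excluded by Pre_ ((0,0) is a dummy).
def pvDir (move : String) : Int × Int :=
  if move = "^" then (-1, 0)
  else if move = "v" then (1, 0)
  else if move = "<" then (0, -1)
  else if move = ">" then (0, 1)
  else (0, 0)

-- ===== PORT A =====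
-- the movability test of A's second loop, for one box
def pvCheckA (grid : List (List String)) (d : Int × Int) (b : (Int × Int) × (Int × Int)) : Bool :=
  pvInB grid (b.1.1 + d.1, b.1.2 + d.2) && pvInB grid (b.2.1 + d.1, b.2.2 + d.2) &&
  pvDot grid (b.1.1 + d.1, b.1.2 + d.2) && pvDot grid (b.2.1 + d.1, b.2.2 + d.2)

-- A's 'while True' tracing loop; fuel only makes it total (grid.length + width + 2
-- bounds the iterations for any unit direction), the fuel-0 branch is never reached then.
def pvAwalk (grid : List (List String)) (d : Int × Int) :
    Nat → List ((Int × Int) × (Int × Int)) → (Int × Int) → (Int × Int) →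
    (List ((Int × Int) × (Int × Int))) × Bool
  | 0, lista, _, _ => (lista, false)
  | n + 1, lista, nl, nr =>
    if pvInB grid nl && pvInB grid nr then
      if pvDot grid nl && pvDot grid nr then (lista, true)
      else if !(lista.contains (nl, nr)) then
        pvAwalk grid d n (lista ++ [(nl, nr)]) (nl.1 + d.1, nl.2 + d.2) (nr.1 + d.1, nr.2 + d.2)
      else (lista, true)
    else (lista, false)

-- A's second loop: 'for left, right in lista_cajas: … movible = False; break'
def pvAphase2 (grid : List (List String)) (d : Int × Int) :
    Bool → List ((Int × Int) × (Int × Int)) → Bool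
  | m, [] => m
  | m, b :: rest => if !(pvCheckA grid d b) then false else pvAphase2 grid d m rest

def listar_box_a_mover (grid : List (List String)) (box : (Int × Int) × (Int × Int)) (move : String) (new_robot_pos : Int × Int) : (List ((Int × Int) × (Int × Int))) × Bool :=
  let d := pvDir move
  let r := pvAwalk grid d (grid.length + pvWidth grid + 2) [box]
             (box.1.1 + d.1, box.1.2 + d.2) (box.2.1 + d.1, box.2.2 + d.2)
  (r.1, pvAphase2 grid d r.2 r.1)

-- ===== PORT B =====
-- B's single fused loop, carrying movible; same totalising fuel.
def pvBwalk (grid : List (List String)) (d : Int × Int) :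
    Nat → List ((Int × Int) × (Int × Int)) → Bool → (Int × Int) × (Int × Int) →
    (List ((Int × Int) × (Int × Int))) × Bool
  | 0, lista, _, _ => (lista, false)
  | n + 1, lista, movible, cur =>
    let nl : Int × Int := (cur.1.1 + d.1, cur.1.2 + d.2)
    let nr : Int × Int := (cur.2.1 + d.1, cur.2.2 + d.2)
    if !(pvInB grid nl && pvInB grid nr) then (lista, false)
    else if pvDot grid nl && pvDot grid nr then (lista, movible)
    else pvBwalk grid d n (lista ++ [(nl, nr)]) false (nl, nr)

def listar_box_a_mover_alt (grid : List (List String)) (box : (Int × Int) × (Int × Int)) (move : String) (new_robot_pos : Int × Int) : (List ((Int × Int) × (Int × Int))) × Bool :=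
  let d := pvDir move
  pvBwalk grid d (grid.length + pvWidth grid + 2) [box] true box

-- ===== PRECONDITION & SPEC =====
-- Pre_ excludes (a) moves outside '^v<>' (Python KeyError) and (b) ragged grids on which
-- the walk could index a row shorter than len(grid[0]) (Python IndexError): for a vertical
-- move the two box columns, when inside [0, width), must exist in every row; for a
-- horizontal move the two box rows, when they exist, must have full width. This is slightly
-- conservative: a ragged grid the walk happens not to reach is excluded too (see cites).
def Pre_listar_box_a_mover (grid : List (List String)) (box : (Int × Int) × (Int × Int)) (move : String) (new_robot_pos : Int × Int) : Prop :=
  ((move = "^" ∨ move = "v") ∧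
    ((0 ≤ box.1.2 ∧ box.1.2 < (pvWidth grid : Int) ∧ 0 ≤ box.2.2 ∧ box.2.2 < (pvWidth grid : Int)) →
      ∀ row ∈ grid, box.1.2 < (row.length : Int) ∧ box.2.2 < (row.length : Int)))
  ∨ ((move = "<" ∨ move = ">") ∧
    (∀ i : Fin grid.length, ((box.1.1 = (i : Nat) ∨ box.2.1 = (i : Nat)) →
      pvWidth grid ≤ (grid.get i).length)))
instance (grid : List (List String)) (box : (Int × Int) × (Int × Int)) (move : String) (new_robot_pos : Int × Int) : Decidable (Pre_listar_box_a_mover grid box move new_robot_pos) := by unfold Pre_listar_box_a_mover; infer_instance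

def pvWitness_listar_box_a_mover : List (List String) × ((Int × Int) × (Int × Int)) × String × (Int × Int) :=
  ([[".", "."], [".", "."]], ((1, 0), (1, 1)), "^", (0, 0))

def Spec_listar_box_a_mover (grid : List (List String)) (box : (Int × Int) × (Int × Int)) (move : String) (new_robot_pos : Int × Int) (out : (List ((Int × Int) × (Int × Int))) × Bool) : Prop := out = listar_box_a_mover_alt grid box move new_robot_pos
instance (grid : List (List String)) (box : (Int × Int) × (Int × Int)) (move : String) (new_robot_pos : Int × Int) (out : (List ((Int × Int) × (Int × Int))) × Bool) : Decidable (Spec_listar_box_a_mover grid box move new_robot_pos out) := by unfold Spec_listar_box_a_mover; infer_instance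

-- ===== CLAIM (what is proved, stated in full; the proofs are below) =====
def Claim_equal_listar_box_a_mover : Prop := ∀ (grid : List (List String)) (box : (Int × Int) × (Int × Int)) (move : String) (new_robot_pos : Int × Int), Dom_listar_box_a_mover grid box move new_robot_pos → Pre_listar_box_a_mover grid box move new_robot_pos → Spec_listar_box_a_mover grid box move new_robot_pos (listar_box_a_mover grid box move new_robot_pos)

-- ===== LEMMAS AND PROOFS =====

-- A's second loop computes m && all-boxes-movable.
theorem pvAphase2_eq (grid : List (List String)) (d : Int × Int) (m : Bool)
    (lista : List ((Int × Int) × (Int × Int))) :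
    pvAphase2 grid d m lista = (m && lista.all (pvCheckA grid d)) := by
  induction lista with
  | nil => simp [pvAphase2]
  | cons b rest ih =>
    simp only [pvAphase2, List.all_cons]
    cases h : pvCheckA grid d b <;> simp [ih]

-- projection of a box onto the direction of movement (left cell)
def pvF (d : Int × Int) (b : (Int × Int) × (Int × Int)) : Int := b.1.1 * d.1 + b.1.2 * d.2

-- main lockstep lemma: A's walk followed by A's check pass equals B's fused walk
theorem pv_walk_eq (grid : List (List String)) (d : Int × Int)
    (hd : d = (-1, 0) ∨ d = (1, 0) ∨ d = (0, -1) ∨ d = (0, 1)) :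
    ∀ (fuel : Nat) (lista : List ((Int × Int) × (Int × Int)))
      (cur : (Int × Int) × (Int × Int)) (mv0 : Bool),
      cur ∈ lista →
      (mv0 = true → lista = [cur]) →
      (mv0 = false → ∃ b ∈ lista, pvCheckA grid d b = false) →
      (∀ b ∈ lista, pvF d b ≤ pvF d cur) →
      (let r := pvAwalk grid d fuel lista (cur.1.1 + d.1, cur.1.2 + d.2) (cur.2.1 + d.1, cur.2.2 + d.2)
       (r.1, pvAphase2 grid d r.2 r.1)) = pvBwalk grid d fuel lista mv0 cur := by
  intro fuel
  induction fuel with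
  | zero =>
    intro lista cur mv0 _ _ _ _
    simp [pvAwalk, pvBwalk, pvAphase2_eq]
  | succ n ih =>
    intro lista cur mv0 hmem htrue hfalse hle
    simp only [pvAwalk, pvBwalk]
    set nl : Int × Int := (cur.1.1 + d.1, cur.1.2 + d.2) with hnl
    set nr : Int × Int := (cur.2.1 + d.1, cur.2.2 + d.2) with hnr
    by_cases hb : (pvInB grid nl && pvInB grid nr) = true
    · rw [if_pos hb]
      have hb' : (!(pvInB grid nl && pvInB grid nr)) = false := by simp [hb]
      rw [hb']
      simp only [Bool.false_eq_true, if_false]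
      by_cases hdot : (pvDot grid nl && pvDot grid nr) = true
      · rw [if_pos hdot, if_pos hdot]
        have hcheck : pvCheckA grid d cur = true := by
          simp only [pvCheckA, ← hnl, ← hnr]
          rcases Bool.and_eq_true _ _ |>.mp hb with ⟨h1, h2⟩
          rcases Bool.and_eq_true _ _ |>.mp hdot with ⟨h3, h4⟩
          simp [h1, h2, h3, h4]
        have hall : lista.all (pvCheckA grid d) = mv0 := by
          cases mv0 with
          | true =>
            have := htrue rfl
            subst this
            simp [hcheck]
          | false =>
            obtain ⟨b, hbm, hbc⟩ := hfalse rfl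
            exact List.all_eq_false.mpr ⟨b, hbm, by simp [hbc]⟩
        simp [pvAphase2_eq, hall]
      · rw [if_neg hdot, if_neg hdot]
        -- (nl, nr) is new: its projection strictly exceeds every element's
        have hstep : pvF d (nl, nr) = pvF d cur + 1 := by
          rcases hd with h | h | h | h <;> subst h <;> simp [pvF, hnl] <;> ring
        have hnotmem : lista.contains ((nl, nr)) = false := by
          have hnm : ¬ ((nl, nr) ∈ lista) := by
            intro hm
            have h1 := hle _ hm
            have hstep' := hstep
            omega
          simpa using hnm
        rw [hnotmem]
        simp only [Bool.not_false, if_true]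
        -- the current box is not movable: cells ahead are not both '.'
        have hcurbad : pvCheckA grid d cur = false := by
          simp only [pvCheckA, ← hnl, ← hnr]
          rcases Bool.and_eq_true _ _ |>.mp hb with ⟨h1, h2⟩
          simp only [h1, h2, Bool.true_and]
          exact Bool.eq_false_iff.mpr hdot
        have := ih (lista ++ [(nl, nr)]) (nl, nr) false
          (by simp)
          (by intro h; cases h)
          (by intro _; exact ⟨cur, by simp [hmem], hcurbad⟩)
          (by
            intro b hbmem
            rcases List.mem_append.mp hbmem with h | h
            · have := hle _ h; omega
            · simp at h; subst h; omega)
        simpa [hnl, hnr] using this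
    · rw [if_neg hb]
      have hb' : (!(pvInB grid nl && pvInB grid nr)) = true := by simp [hb]
      rw [hb']
      simp [pvAphase2_eq]

-- ===== VERDICT (by name: the statement is the Claim_ definition above) =====
theorem listar_box_a_mover_spec : Claim_equal_listar_box_a_mover := by
  intro grid box move new_robot_pos _ hpre
  unfold Spec_listar_box_a_mover listar_box_a_mover listar_box_a_mover_alt
  have hmove : move = "^" ∨ move = "v" ∨ move = "<" ∨ move = ">" := by
    unfold Pre_listar_box_a_mover at hpre
    tauto
  have hd : pvDir move = (-1, 0) ∨ pvDir move = (1, 0) ∨ pvDir move = (0, -1) ∨ pvDir move = (0, 1) := by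
    rcases hmove with h | h | h | h <;> subst h <;> simp [pvDir]
  have := pv_walk_eq grid (pvDir move) hd (grid.length + pvWidth grid + 2) [box] box true
    (by simp) (fun _ => rfl) (by intro h; cases h) (by intro b hb; simp at hb; subst hb; exact le_refl _)
  simpa using this
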